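-- pv_equiv track=rewrite | github.com/vidzsharma/BTL-TRACKING-SYSTEM | backend/mis.py | is_dsa_campaign
-- ===== SOURCE A (Python) =====
-- def is_dsa_campaign(campaign_id):
--     """Check if FORM CAMPAIGN_ID belongs to a DSA (not system campaigns)"""
--     if not campaign_id:
--         return False
--
--     campaign_id = str(campaign_id).upper()
--
--     # Non-DSA patterns that should be filtered out
--     non_dsa_patterns = ['CHKR', 'ENKR', 'AF', 'PS', 'CCCAMPAIGN', 'TQ', 'BNKR', 'FBA', 'PAID']
--
--     # Check if it contains any non-DSA pattern
--     for pattern in non_dsa_patterns: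
--         if pattern in campaign_id:
--             return False
--
--     return True
-- ===== SOURCE B (Python) =====
-- def is_dsa_campaign(campaign_id):
--     """Check if FORM CAMPAIGN_ID belongs to a DSA (not system campaigns)"""
--     if not campaign_id:
--         return False
--     s = str(campaign_id).upper()
--     pats = 'CHKR ENKR AF PS CCCAMPAIGN TQ BNKR FBA PAID'.split()
--     # enumerate every substring of s whose length is a pattern length, then one set test
--     lens = {len(p) for p in pats}
--     windows = {s[i:i + n] for n in lens for i in range(len(s) - n + 1)}
--     return set(pats).isdisjoint(windows)
-- ===== Notes on version B (the rewrite author's own statement) =====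
-- stated objective: alternative
-- what changed: Instead of running a separate substring search over the string for each of the nine patterns, B enumerates all substrings of the string whose lengths are pattern lengths into a set and returns whether that set is disjoint from the pattern set.
import Mathlib
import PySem

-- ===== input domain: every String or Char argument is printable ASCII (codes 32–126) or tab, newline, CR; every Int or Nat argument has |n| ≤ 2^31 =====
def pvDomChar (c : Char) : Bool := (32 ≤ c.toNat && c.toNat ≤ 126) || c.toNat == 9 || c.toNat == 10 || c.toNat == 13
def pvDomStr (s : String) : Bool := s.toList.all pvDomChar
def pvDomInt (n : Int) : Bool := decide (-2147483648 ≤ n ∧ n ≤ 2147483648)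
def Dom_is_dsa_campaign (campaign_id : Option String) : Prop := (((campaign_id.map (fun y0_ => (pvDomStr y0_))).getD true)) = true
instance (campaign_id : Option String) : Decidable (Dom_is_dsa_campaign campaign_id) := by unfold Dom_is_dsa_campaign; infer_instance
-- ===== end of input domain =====

-- B replaces A's per-pattern substring searches by enumerating all substrings of the
-- pattern lengths into a set and testing disjointness against the pattern set
-- (objective: alternative; same exact return value).

-- ===== PORT A =====
-- A's pattern list literal
def pvPatsA : List (List Char) :=
  ["CHKR".toList, "ENKR".toList, "AF".toList, "PS".toList, "CCCAMPAIGN".toList,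
   "TQ".toList, "BNKR".toList, "FBA".toList, "PAID".toList]

-- A's loop: for pattern in non_dsa_patterns: if pattern in campaign_id: return False; return True
def pvLoopA (u : List Char) : List (List Char) → Bool
  | [] => true
  | p :: rest => if PySem.Chars.isIn p u then false else pvLoopA u rest

def is_dsa_campaign (campaign_id : Option String) : Bool :=
  match campaign_id with
  | none => false
  | some s =>
    if s.toList = [] then false
    else pvLoopA (PySem.Chars.upper s.toList) pvPatsA

-- ===== PORT B =====
-- B's pattern list: 'CHKR ENKR AF PS CCCAMPAIGN TQ BNKR FBA PAID'.split()
def pvPatsB : List (List Char) :=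
  PySem.Chars.split₀ "CHKR ENKR AF PS CCCAMPAIGN TQ BNKR FBA PAID".toList

-- windows = {s[i:i+n] for n in lens for i in range(len(s)-n+1)}
-- s[i:i+n] with 0 ≤ i, 0 ≤ n is exactly (u.drop i).take n (PySem.List.slice_toNat);
-- range(len(s)-n+1) = List.range (u.length + 1 - n): for n ≤ len both count len-n+1,
-- for n > len Python's bound is ≤ 0 and Nat subtraction clamps to 0 — both empty.
def pvWindows (u : List Char) (lens : PySem.Set Nat) : PySem.Set (List Char) :=
  PySem.Set.ofList
    (lens.flatMap fun n => (List.range (u.length + 1 - n)).map fun i => (u.drop i).take n)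

def is_dsa_campaign_alt (campaign_id : Option String) : Bool :=
  match campaign_id with
  | none => false
  | some s =>
    if s.toList = [] then false
    else
      let u := PySem.Chars.upper s.toList
      let lens : PySem.Set Nat := PySem.Set.ofList (pvPatsB.map List.length)
      PySem.Set.isdisjoint (PySem.Set.ofList pvPatsB) (pvWindows u lens)

-- ===== PRECONDITION & SPEC =====
def Spec_is_dsa_campaign (campaign_id : Option String) (out : Bool) : Prop := out = is_dsa_campaign_alt campaign_id
instance (campaign_id : Option String) (out : Bool) : Decidable (Spec_is_dsa_campaign campaign_id out) := by unfold Spec_is_dsa_campaign; infer_instance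

-- ===== CLAIM (what is proved, stated in full; the proofs are below) =====
def Claim_equal_is_dsa_campaign : Prop := ∀ (campaign_id : Option String), Dom_is_dsa_campaign campaign_id → Spec_is_dsa_campaign campaign_id (is_dsa_campaign campaign_id)

-- ===== LEMMAS AND PROOFS =====

lemma pvLoopA_eq_true_iff (u : List Char) (pats : List (List Char)) :
    pvLoopA u pats = true ↔ ∀ p ∈ pats, ¬ p <:+: u := by
  induction pats with
  | nil => simp [pvLoopA]
  | cons p rest ih =>
    simp only [pvLoopA]
    by_cases h : PySem.Chars.isIn p u = true
    · have : p <:+: u := (PySem.Chars.isIn_iff_infix p u).mp h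
      simp only [h, if_true]
      constructor
      · intro hc; exact absurd hc (by simp)
      · intro hall; exact absurd this (hall p (List.mem_cons_self ..))
    · have hp : ¬ p <:+: u := fun hc => h ((PySem.Chars.isIn_iff_infix p u).mpr hc)
      simp [h, ih, hp]

-- every enumerated window is an infix of u
lemma infix_of_mem_windows (u : List Char) (lens : PySem.Set Nat) (p : List Char)
    (h : p ∈ pvWindows u lens) : p <:+: u := by
  unfold pvWindows at h
  rw [PySem.Set.mem_ofList] at h
  simp only [List.mem_flatMap, List.mem_map, List.mem_range] at h
  obtain ⟨n, _, i, _, rfl⟩ := h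
  exact ((u.drop i).take_prefix n).isInfix.trans (u.drop_suffix i).isInfix

-- conversely, every infix of u whose length is in lens is enumerated
lemma mem_windows_of_infix (u : List Char) (lens : PySem.Set Nat) (p : List Char)
    (hlen : p.length ∈ lens) (h : p <:+: u) : p ∈ pvWindows u lens := by
  obtain ⟨s, t, rfl⟩ := h
  unfold pvWindows
  rw [PySem.Set.mem_ofList]
  simp only [List.mem_flatMap, List.mem_map, List.mem_range]
  refine ⟨p.length, hlen, s.length, ?_, ?_⟩
  · simp only [List.length_append]
    omega
  · rw [List.append_assoc, List.drop_left, List.take_left]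

lemma ports_agree (u : List Char) :
    pvLoopA u pvPatsA
      = PySem.Set.isdisjoint (PySem.Set.ofList pvPatsB)
          (pvWindows u (PySem.Set.ofList (pvPatsB.map List.length))) := by
  have hAB : pvPatsA = pvPatsB := by decide
  rw [Bool.eq_iff_iff, pvLoopA_eq_true_iff, PySem.Set.isdisjoint_iff, hAB]
  constructor
  · intro hall p hp hw
    rw [PySem.Set.mem_ofList] at hp
    exact hall p hp (infix_of_mem_windows _ _ _ hw)
  · intro hdisj p hp hinf
    have hlen : p.length ∈ PySem.Set.ofList (pvPatsB.map List.length) := by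
      rw [PySem.Set.mem_ofList]; exact List.mem_map_of_mem hp
    exact hdisj p (by rw [PySem.Set.mem_ofList]; exact hp)
      (mem_windows_of_infix _ _ _ hlen hinf)

-- ===== VERDICT (by name: the statement is the Claim_ definition above) =====
theorem is_dsa_campaign_spec : Claim_equal_is_dsa_campaign := by
  intro campaign_id _
  unfold Spec_is_dsa_campaign is_dsa_campaign is_dsa_campaign_alt
  match campaign_id with
  | none => rfl
  | some s =>
    by_cases h : s.toList = []
    · simp [h]
    · simp [h, ports_agree]
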